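-- pv_equiv track=rewrite | github.com/mauza/kata | 2020/Oct/SLC_Big_Mountain_Data_and_Dev_Conf/question3.py | getMaximumScore
-- ===== SOURCE A (Python) =====
-- def getMaximumScore(integerArray):
--     score = 0
--     # 1st iteration
--     iteration = 1
--     while len(integerArray) > 0:
--         if iteration % 2 == 1:
--             score += sum(integerArray)
--         else:
--             score -= sum(integerArray)
--         if True:
--             integerArray.pop(-1)
--         else:
--             integerArray.pop(0)
--         iteration += 1
--     return score
-- ===== SOURCE B (Python) =====
-- def getMaximumScore(integerArray):
--     # Single O(n) pass: only every other element counted from the END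
--     # survives the telescoping alternating sums. (Unlike A, does not
--     # mutate its argument.)
--     total = 0
--     take = True
--     for x in reversed(integerArray):
--         if take:
--             total += x
--         take = not take
--     return total
-- ===== Notes on version B (the rewrite author's own statement) =====
-- stated objective: faster
-- what changed: Replaced the quadratic loop that re-sums the whole shrinking array each iteration with a single reverse pass adding every other element from the end (the alternating suffix sums telescope); B also does not mutate its argument, while A empties it.
import Mathlib
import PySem

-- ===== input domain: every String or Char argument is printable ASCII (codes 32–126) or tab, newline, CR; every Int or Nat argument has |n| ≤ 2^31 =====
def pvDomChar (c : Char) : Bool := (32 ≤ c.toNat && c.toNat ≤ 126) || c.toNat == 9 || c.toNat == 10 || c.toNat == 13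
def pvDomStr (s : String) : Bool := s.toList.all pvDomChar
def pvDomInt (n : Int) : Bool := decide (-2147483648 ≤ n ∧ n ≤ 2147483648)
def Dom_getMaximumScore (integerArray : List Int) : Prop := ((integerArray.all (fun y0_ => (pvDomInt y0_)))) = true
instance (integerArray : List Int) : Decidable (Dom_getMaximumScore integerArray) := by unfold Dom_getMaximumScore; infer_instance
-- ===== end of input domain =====

-- B replaces A's quadratic re-summing loop with one reverse pass adding every
-- other element; equivalence is about the RETURN value only (Python A empties
-- its argument in place, B does not).

-- ===== PORT A =====
-- while len(arr) > 0: score ± sum(arr); arr.pop(-1) (= dropLast on a nonempty list); iteration += 1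
def getMaximumScoreLoop (integerArray : List Int) (score : Int) (iteration : Int) : Int :=
  if integerArray.length > 0 then
    getMaximumScoreLoop integerArray.dropLast
      (if PySem.Int.mod iteration 2 = 1 then score + integerArray.sum else score - integerArray.sum)
      (iteration + 1)
  else score
termination_by integerArray.length
decreasing_by simpa using Nat.pred_lt (by omega)

def getMaximumScore (integerArray : List Int) : Int :=
  getMaximumScoreLoop integerArray 0 1

-- ===== PORT B =====
-- for x in reversed(arr): if take: total += x; take = not take
def getMaximumScore_alt (integerArray : List Int) : Int :=
  (integerArray.reverse.foldl
    (fun (st : Int × Bool) x => (if st.2 then st.1 + x else st.1, !st.2)) (0, true)).1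

-- ===== PRECONDITION & SPEC =====
def Spec_getMaximumScore (integerArray : List Int) (out : Int) : Prop := out = getMaximumScore_alt integerArray
instance (integerArray : List Int) (out : Int) : Decidable (Spec_getMaximumScore integerArray out) := by unfold Spec_getMaximumScore; infer_instance

-- ===== CLAIM (what is proved, stated in full; the proofs are below) =====
def Claim_equal_getMaximumScore : Prop := ∀ (integerArray : List Int), Dom_getMaximumScore integerArray → Spec_getMaximumScore integerArray (getMaximumScore integerArray)

-- ===== LEMMAS AND PROOFS =====

-- B's fold step
def pvStep (st : Int × Bool) (x : Int) : Int × Bool := (if st.2 then st.1 + x else st.1, !st.2)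

lemma pvStep_eq : (fun (st : Int × Bool) x => ((if st.2 then st.1 + x else st.1 : Int), !st.2)) = pvStep := rfl

lemma pvStep_true (t x : Int) : pvStep (t, true) x = (t + x, false) := rfl
lemma pvStep_false (t x : Int) : pvStep (t, false) x = (t, true) := rfl

-- the accumulator shifts out of the fold
lemma pvFold_shift (ys : List Int) (t : Int) (b : Bool) :
    (ys.foldl pvStep (t, b)).1 = t + (ys.foldl pvStep (0, b)).1 := by
  induction ys generalizing t b with
  | nil => simp
  | cons y ys ih =>
    cases b with
    | false => simp only [List.foldl, pvStep_false]; exact ih t true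
    | true =>
      simp only [List.foldl, pvStep_true, zero_add]
      rw [ih (t + y) false, ih y false]; ring

-- the two toggle phases together sum the whole list
lemma pvFold_phases (ys : List Int) :
    (ys.foldl pvStep (0, false)).1 + (ys.foldl pvStep (0, true)).1 = ys.sum := by
  induction ys with
  | nil => simp
  | cons y ys ih =>
    simp only [List.foldl, pvStep_false, pvStep_true, zero_add, List.sum_cons]
    rw [pvFold_shift ys y false]
    omega

-- main invariant: A's loop on ys.reverse computes ±(B's fold over ys)
lemma pvLoop_eq (ys : List Int) (score iteration : Int) :
    getMaximumScoreLoop ys.reverse score iteration =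
      score + (if PySem.Int.mod iteration 2 = 1 then (ys.foldl pvStep (0, true)).1
               else -(ys.foldl pvStep (0, true)).1) := by
  induction ys generalizing score iteration with
  | nil => simp [getMaximumScoreLoop]
  | cons y ys ih =>
    rw [getMaximumScoreLoop]
    have hlen : (y :: ys).reverse.length > 0 := by simp
    have hdl : (y :: ys).reverse.dropLast = ys.reverse := by
      simp [List.reverse_cons]
    have hsum : (y :: ys).reverse.sum = y + ys.sum := by simp [add_comm]
    simp only [hlen, if_pos, hdl, hsum]
    rw [ih]
    simp only [List.foldl, pvStep_true, zero_add]
    rw [pvFold_shift ys y false]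
    have hph := pvFold_phases ys
    rw [PySem.Int.mod_eq_emod_of_pos (a := iteration) (by omega),
        PySem.Int.mod_eq_emod_of_pos (a := iteration + 1) (by omega)]
    split_ifs <;> omega

-- ===== VERDICT (by name: the statement is the Claim_ definition above) =====
theorem getMaximumScore_spec : Claim_equal_getMaximumScore := by
  intro arr _
  unfold Spec_getMaximumScore getMaximumScore getMaximumScore_alt
  rw [pvStep_eq]
  have h := pvLoop_eq arr.reverse 0 1
  rw [List.reverse_reverse] at h
  rw [h, show PySem.Int.mod 1 2 = 1 from by decide]
  simp
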